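-- pv_equiv track=rewrite | github.com/Gullutio/Python2Guillermo | ex117.py | word_findr
-- ===== SOURCE A (Python) =====
-- def word_findr(input):
--     word_list = []
--     word = ""
--     for count, i in enumerate(input):
--         if (
--             i == "."
--             or i == "!"
--             or i == "?"
--             or i == ","  # a' 'a
--             or i == ";"
--             or i == ":"
--             or i == "'"
--         ):
--             if count != 0 and count + 1 < len(input):
--                 if input[count - 1].isalpha() and input[count + 1].isalpha():
--                     word += i
--         elif i == " ":
--             word_list.append(word)
--             word = ""
--         else:
--             word += i
--     word_list.append(word)
--     for i in range(word_list.count("")):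
--         word_list.remove("")
--     return word_list
-- ===== SOURCE B (Python) =====
-- PUNCT = ".!?,;:'"
--
--
-- def _clean(tok):
--     out = []
--     for j, c in enumerate(tok):
--         if c not in PUNCT:
--             out.append(c)
--         elif 0 < j < len(tok) - 1 and tok[j - 1].isalpha() and tok[j + 1].isalpha():
--             out.append(c)
--     return "".join(out)
--
--
-- def word_findr(input):
--     return [w for w in map(_clean, input.split(' ')) if w]
-- ===== Notes on version B (the rewrite author's own statement) =====
-- stated objective: alternative
-- what changed: B splits the input at space characters and cleans each token separately with local neighbour indices, appending only non-empty cleaned words, instead of A's single flat scan with global-index neighbour lookups followed by a count/remove pass that deletes empty words afterwards.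
import Mathlib
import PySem

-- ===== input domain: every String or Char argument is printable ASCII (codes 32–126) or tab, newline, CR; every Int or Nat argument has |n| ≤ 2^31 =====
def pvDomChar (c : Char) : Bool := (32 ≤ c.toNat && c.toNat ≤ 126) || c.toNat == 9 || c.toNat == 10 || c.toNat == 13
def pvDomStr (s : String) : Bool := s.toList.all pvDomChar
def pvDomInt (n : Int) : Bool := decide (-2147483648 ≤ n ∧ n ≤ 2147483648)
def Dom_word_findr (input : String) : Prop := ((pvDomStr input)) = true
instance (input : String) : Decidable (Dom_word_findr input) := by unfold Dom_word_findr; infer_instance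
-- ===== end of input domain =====

-- B re-implements A by tokenizing on ' ' and cleaning each token with local neighbour
-- indices (dropping empty words as they arise), instead of A's flat indexed scan over the
-- whole string followed by a count/remove pass; objective: alternative decomposition.

-- ===== PORT A =====
-- the punctuation test of A's first if (the same 7-char set both sources write literally)
def pvPunct (c : Char) : Bool :=
  c == '.' || c == '!' || c == '?' || c == ',' || c == ';' || c == ':' || c == '\''

-- loop body of A's 'for count, i in enumerate(input)'; input[count-1]/input[count+1] are
-- in range under the guard, so pyGetD is exact there
def pvStepA (cs : List Char) (st : List (List Char) × List Char) (p : Int × Char) :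
    List (List Char) × List Char :=
  if pvPunct p.2 then
    if p.1 ≠ 0 ∧ p.1 + 1 < (cs.length : Int) then
      if PySem.Chars.isalpha (PySem.List.pyGetD cs (p.1 - 1) ' ')
          && PySem.Chars.isalpha (PySem.List.pyGetD cs (p.1 + 1) ' ') then
        (st.1, st.2 ++ [p.2])
      else st
    else st
  else if p.2 == ' ' then (st.1 ++ [st.2], [])
  else (st.1, st.2 ++ [p.2])

def word_findr (input : String) : List String :=
  let cs := input.toList
  let r := (PySem.List.enumerate cs 0).foldl (pvStepA cs) ([], [])
  let wl := r.1 ++ [r.2]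
  -- for i in range(word_list.count("")): word_list.remove("")  (remove never fails here)
  let wl2 := (List.range (wl.count [])).foldl (fun acc _ => (PySem.List.remove? acc []).getD acc) wl
  wl2.map (fun w => String.ofList w)

-- ===== PORT B =====
-- loop body of _clean's 'for j, c in enumerate(tok)'; tok[j-1]/tok[j+1] in range under the guard
def pvCleanStep (tok : List Char) (out : List Char) (p : Int × Char) : List Char :=
  if pvPunct p.2 = false then out ++ [p.2]
  else if 0 < p.1 ∧ p.1 < (tok.length : Int) - 1 ∧
      (PySem.Chars.isalpha (PySem.List.pyGetD tok (p.1 - 1) ' ')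
        && PySem.Chars.isalpha (PySem.List.pyGetD tok (p.1 + 1) ' ')) = true then
    out ++ [p.2]
  else out

def pvCleanTok (tok : List Char) : List Char :=
  (PySem.List.enumerate tok 0).foldl (pvCleanStep tok) []

-- loop body of B's tokenizing 'for c in input'
def pvStepB (st : List (List Char) × List Char) (c : Char) : List (List Char) × List Char :=
  if c == ' ' then
    let w := pvCleanTok st.2
    (st.1 ++ (if w ≠ [] then [w] else []), [])
  else (st.1, st.2 ++ [c])

def word_findr_alt (input : String) : List String :=
  let r := input.toList.foldl pvStepB ([], [])
  let w := pvCleanTok r.2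
  (r.1 ++ (if w ≠ [] then [w] else [])).map (fun t => String.ofList t)

-- ===== PRECONDITION & SPEC =====
def Spec_word_findr (input : String) (out : List String) : Prop := out = word_findr_alt input
instance (input : String) (out : List String) : Decidable (Spec_word_findr input out) := by unfold Spec_word_findr; infer_instance

-- ===== CLAIM (what is proved, stated in full; the proofs are below) =====
def Claim_equal_word_findr : Prop := ∀ (input : String), Dom_word_findr input → Spec_word_findr input (word_findr input)

-- ===== LEMMAS AND PROOFS =====

-- 'is an alphabetic character' for an optional neighbour (absent neighbour = not alphabetic)
def pvAlphaO : Option Char → Bool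
  | none => false
  | some c => PySem.Chars.isalpha c

-- contextual form of A's scan: prev = the character before the current suffix
def pvScan : Option Char → List (List Char) → List Char → List Char → List (List Char) × List Char
  | _, wl, w, [] => (wl, w)
  | prev, wl, w, c :: rest =>
    if pvPunct c then
      pvScan (some c) wl (if pvAlphaO prev && pvAlphaO rest.head? then w ++ [c] else w) rest
    else if c = ' ' then pvScan (some c) (wl ++ [w]) [] rest
    else pvScan (some c) wl (w ++ [c]) rest

-- contextual form of B's token cleaner: pa = whether the char before the suffix is alphabetic
def pvClean : Bool → List Char → List Char
  | _, [] => []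
  | pa, c :: rest =>
    (if pvPunct c then (if pa && pvAlphaO rest.head? then [c] else []) else [c])
      ++ pvClean (PySem.Chars.isalpha c) rest

theorem pv_isalpha_space : PySem.Chars.isalpha ' ' = false := by decide

theorem pv_getD_pred (pre l2 : List Char) (h : pre ≠ []) (d : Char) :
    PySem.List.pyGetD (pre ++ l2) ((pre.length : Int) - 1) d = pre.getLast h := by
  have hl : 0 < pre.length := List.length_pos_of_ne_nil h
  rw [PySem.List.pyGetD_eq_getElem _ _ (by omega)
      (by push_cast [List.length_append]; omega)]
  have ht : ((pre.length : Int) - 1).toNat = pre.length - 1 := by omega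
  simp only [ht]
  rw [List.getElem_append_left (by omega)]
  rw [List.getLast_eq_getElem]

theorem pv_getD_succ (pre : List Char) (c r : Char) (rs : List Char) (d : Char) :
    PySem.List.pyGetD (pre ++ c :: r :: rs) ((pre.length : Int) + 1) d = r := by
  rw [PySem.List.pyGetD_eq_getElem _ _ (by omega)
      (by push_cast [List.length_append, List.length_cons, List.length_nil]; omega)]
  have ht : ((pre.length : Int) + 1).toNat = pre.length + 1 := by omega
  simp only [ht]
  rw [List.getElem_append_right (by omega)]
  simp

theorem pv_alphaO_some (c : Char) : pvAlphaO (some c) = PySem.Chars.isalpha c := rfl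

theorem pv_alphaO_none : pvAlphaO none = false := rfl

theorem pv_alphaO_getLast (pre : List Char) (h : pre ≠ []) :
    pvAlphaO pre.getLast? = PySem.Chars.isalpha (pre.getLast h) := by
  rw [List.getLast?_eq_some_getLast h]
  rfl

theorem pv_stepA_eval (pre rest : List Char) (c : Char) (wl : List (List Char)) (w : List Char) :
    pvStepA (pre ++ c :: rest) (wl, w) ((pre.length : Int), c)
      = if pvPunct c then
          (wl, if pvAlphaO pre.getLast? && pvAlphaO rest.head? then w ++ [c] else w)
        else if c = ' ' then (wl ++ [w], [])
        else (wl, w ++ [c]) := by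
  simp only [pvStepA]
  by_cases hp : pvPunct c = true
  · rw [if_pos hp, if_pos hp]
    by_cases h0 : pre = []
    · subst h0
      simp [pv_alphaO_none]
    · by_cases hr : rest = []
      · subst hr
        rw [if_neg (by rintro ⟨-, h2⟩; push_cast [List.length_append, List.length_cons, List.length_nil] at h2; omega)]
        simp [pv_alphaO_none]
      · obtain ⟨r, rs, rfl⟩ : ∃ r rs, rest = r :: rs := by
          cases rest with
          | nil => exact absurd rfl hr
          | cons r rs => exact ⟨r, rs, rfl⟩
        rw [if_pos ⟨by have := List.length_pos_of_ne_nil h0; omega,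
              by push_cast [List.length_append, List.length_cons, List.length_nil]; omega⟩]
        rw [pv_getD_pred pre _ h0, pv_getD_succ]
        rw [pv_alphaO_getLast pre h0]
        simp only [List.head?_cons, pv_alphaO_some]
        by_cases hb : (PySem.Chars.isalpha (pre.getLast h0) && PySem.Chars.isalpha r) = true
        · rw [if_pos hb, if_pos hb]
        · rw [if_neg hb, if_neg hb]
  · rw [if_neg hp, if_neg hp]
    by_cases hs : c = ' '
    · subst hs; simp
    · simp [hs]

theorem pv_enumFoldA (rest : List Char) : ∀ (pre : List Char) (wl : List (List Char)) (w : List Char),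
    (PySem.List.enumerate rest (pre.length : Int)).foldl (pvStepA (pre ++ rest)) (wl, w)
      = pvScan pre.getLast? wl w rest := by
  induction rest with
  | nil => intro pre wl w; simp [PySem.List.enumerate_nil, pvScan]
  | cons c rest ih =>
    intro pre wl w
    rw [PySem.List.enumerate_cons, List.foldl_cons, pv_stepA_eval]
    have h1 : (pre.length : Int) + 1 = (((pre ++ [c]).length : Int)) := by
      push_cast [List.length_append, List.length_cons, List.length_nil]; ring
    have h2 : pre ++ c :: rest = (pre ++ [c]) ++ rest := by simp
    rw [h1, h2]
    by_cases hp : pvPunct c = true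
    · rw [if_pos hp]
      rw [ih (pre ++ [c]) wl (if pvAlphaO pre.getLast? && pvAlphaO rest.head? then w ++ [c] else w)]
      rw [List.getLast?_concat]
      conv_rhs => rw [pvScan]
      rw [if_pos hp]
    · rw [if_neg hp]
      by_cases hs : c = ' '
      · subst hs
        rw [if_pos rfl]
        rw [ih (pre ++ [' ']) (wl ++ [w]) []]
        rw [List.getLast?_concat]
        conv_rhs => rw [pvScan]
        rw [if_neg hp, if_pos rfl]
      · rw [if_neg hs]
        rw [ih (pre ++ [c]) wl (w ++ [c])]
        rw [List.getLast?_concat]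
        conv_rhs => rw [pvScan]
        rw [if_neg hp, if_neg hs]

theorem pv_cleanStep_eval (pre rest : List Char) (c : Char) (acc : List Char) :
    pvCleanStep (pre ++ c :: rest) acc ((pre.length : Int), c)
      = acc ++ (if pvPunct c then (if pvAlphaO pre.getLast? && pvAlphaO rest.head? then [c] else []) else [c]) := by
  simp only [pvCleanStep]
  by_cases hp : pvPunct c = true
  · rw [if_neg (by simp [hp]), if_pos hp]
    by_cases h0 : pre = []
    · subst h0
      rw [if_neg (by rintro ⟨h1, -, -⟩; simp at h1)]
      simp [pv_alphaO_none]
    · by_cases hr : rest = []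
      · subst hr
        rw [if_neg (by rintro ⟨-, h2, -⟩; push_cast [List.length_append, List.length_cons, List.length_nil] at h2; omega)]
        simp [pv_alphaO_none]
      · obtain ⟨r, rs, rfl⟩ : ∃ r rs, rest = r :: rs := by
          cases rest with
          | nil => exact absurd rfl hr
          | cons r rs => exact ⟨r, rs, rfl⟩
        by_cases hb : (PySem.Chars.isalpha (PySem.List.pyGetD (pre ++ c :: r :: rs) ((pre.length : Int) - 1) ' ')
            && PySem.Chars.isalpha (PySem.List.pyGetD (pre ++ c :: r :: rs) ((pre.length : Int) + 1) ' ')) = true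
        · rw [if_pos ⟨by have := List.length_pos_of_ne_nil h0; omega,
              by push_cast [List.length_append, List.length_cons, List.length_nil]; omega, hb⟩]
          rw [pv_getD_pred pre _ h0, pv_getD_succ] at hb
          rw [pv_alphaO_getLast pre h0]
          simp only [List.head?_cons, pv_alphaO_some]
          rw [if_pos hb]
        · rw [if_neg (fun hcond => hb hcond.2.2)]
          rw [pv_getD_pred pre _ h0, pv_getD_succ] at hb
          rw [pv_alphaO_getLast pre h0]
          simp only [List.head?_cons, pv_alphaO_some]
          rw [if_neg hb]
          simp
  · have hp' : pvPunct c = false := by simpa using hp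
    rw [if_pos (by simp [hp']), if_neg hp]

theorem pv_cleanFold (rest : List Char) : ∀ (pre acc : List Char),
    (PySem.List.enumerate rest (pre.length : Int)).foldl (pvCleanStep (pre ++ rest)) acc
      = acc ++ pvClean (pvAlphaO pre.getLast?) rest := by
  induction rest with
  | nil => intro pre acc; simp [PySem.List.enumerate_nil, pvClean]
  | cons c rest ih =>
    intro pre acc
    rw [PySem.List.enumerate_cons, List.foldl_cons, pv_cleanStep_eval]
    have h1 : (pre.length : Int) + 1 = (((pre ++ [c]).length : Int)) := by
      push_cast [List.length_append, List.length_cons, List.length_nil]; ring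
    have h2 : pre ++ c :: rest = (pre ++ [c]) ++ rest := by simp
    rw [h1, h2, ih (pre ++ [c])]
    rw [List.getLast?_concat]
    conv_rhs => rw [pvClean]
    simp only [pv_alphaO_some, List.append_assoc]

theorem pv_cleanTok_eq (tok : List Char) : pvCleanTok tok = pvClean false tok := by
  unfold pvCleanTok
  have h := pv_cleanFold tok [] []
  simpa using h

theorem pv_scan_none (l : List Char) (wl : List (List Char)) (w : List Char) :
    pvScan none wl w l = pvScan (some ' ') wl w l := by
  cases l with
  | nil => rfl
  | cons c rest => simp [pvScan, pv_alphaO_none, pv_alphaO_some, pv_isalpha_space]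

theorem pv_alphaO_head_space (t rest : List Char) :
    pvAlphaO ((t ++ ' ' :: rest).head?) = pvAlphaO t.head? := by
  cases t with
  | nil => simp [pv_alphaO_none, pv_alphaO_some, pv_isalpha_space]
  | cons x xs => simp

theorem pv_tok_nospace (tok : List Char) : ∀ (p : Char) (wl : List (List Char)) (w : List Char),
    ' ' ∉ tok → pvScan (some p) wl w tok = (wl, w ++ pvClean (PySem.Chars.isalpha p) tok) := by
  induction tok with
  | nil => intro p wl w _; simp [pvScan, pvClean]
  | cons c t ih =>
    intro p wl w h
    have hc : ¬ c = ' ' := by intro e; exact h (e ▸ List.mem_cons_self)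
    have ht : ' ' ∉ t := fun m => h (List.mem_cons_of_mem _ m)
    by_cases hp : pvPunct c = true
    · simp only [pvScan, pv_alphaO_some]
      rw [if_pos hp, ih c wl _ ht]
      conv_rhs => rw [pvClean]
      rw [if_pos hp]
      by_cases hb : (PySem.Chars.isalpha p && pvAlphaO t.head?) = true
      · rw [if_pos hb, if_pos hb]; simp
      · rw [if_neg hb, if_neg hb]; simp
    · simp only [pvScan]
      rw [if_neg hp, if_neg hc, ih c wl _ ht]
      conv_rhs => rw [pvClean]
      rw [if_neg hp]
      simp

theorem pv_tok_space (tok : List Char) : ∀ (p : Char) (wl : List (List Char)) (w : List Char)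
    (rest : List Char), ' ' ∉ tok →
    pvScan (some p) wl w (tok ++ ' ' :: rest)
      = pvScan (some ' ') (wl ++ [w ++ pvClean (PySem.Chars.isalpha p) tok]) [] rest := by
  induction tok with
  | nil =>
    intro p wl w rest _
    simp only [List.nil_append]
    rw [pvScan]
    rw [if_neg (by decide), if_pos rfl]
    simp [pvClean]
  | cons c t ih =>
    intro p wl w rest h
    have hc : ¬ c = ' ' := by intro e; exact h (e ▸ List.mem_cons_self)
    have ht : ' ' ∉ t := fun m => h (List.mem_cons_of_mem _ m)
    by_cases hp : pvPunct c = true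
    · simp only [List.cons_append, pvScan, pv_alphaO_some, pv_alphaO_head_space]
      rw [if_pos hp, ih c wl _ rest ht]
      conv_rhs => rw [pvClean]
      rw [if_pos hp]
      by_cases hb : (PySem.Chars.isalpha p && pvAlphaO t.head?) = true
      · rw [if_pos hb, if_pos hb]; simp
      · rw [if_neg hb, if_neg hb]; simp
    · simp only [List.cons_append, pvScan]
      rw [if_neg hp, if_neg hc, ih c wl _ rest ht]
      conv_rhs => rw [pvClean]
      rw [if_neg hp]
      simp

theorem pv_foldRange_iterate {α : Type} (g : α → α) (n : Nat) (l : α) :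
    (List.range n).foldl (fun acc _ => g acc) l = g^[n] l := by
  induction n generalizing l with
  | zero => rfl
  | succ n ih =>
    rw [List.range_succ_eq_map]
    simp only [List.foldl_cons, List.foldl_map]
    rw [Function.iterate_succ_apply]
    exact ih (g l)

theorem pv_erase_filter (v : List Char) (l : List (List Char)) :
    (l.erase v).filter (fun x => x ≠ v) = l.filter (fun x => x ≠ v) := by
  induction l with
  | nil => rfl
  | cons x xs ih =>
    by_cases hx : x = v
    · subst hx
      simp [List.erase_cons_head]
    · rw [List.erase_cons_tail (by simp [hx])]
      simp only [List.filter_cons]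
      rw [ih]

theorem pv_iterRem (n : Nat) : ∀ l : List (List Char), l.count [] = n →
    (fun acc => (PySem.List.remove? acc ([] : List Char)).getD acc)^[n] l
      = l.filter (fun x => x ≠ []) := by
  induction n with
  | zero =>
    intro l h
    have hnm : ([] : List Char) ∉ l := by
      rw [← List.count_eq_zero]; exact h
    simp only [Function.iterate_zero, id]
    refine (List.filter_eq_self.mpr ?_).symm
    intro a ha
    simp only [ne_eq, decide_eq_true_eq]
    intro e
    subst e
    exact hnm ha
  | succ n ih =>
    intro l h
    have hmem : ([] : List Char) ∈ l := by
      have : 0 < l.count ([] : List Char) := by omega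
      exact List.count_pos_iff.mp this
    rw [Function.iterate_succ_apply]
    have hs : (PySem.List.remove? l ([] : List Char)).getD l = l.erase [] := by
      rw [PySem.List.remove?_eq_some_erase l [] hmem]
      rfl
    rw [hs, ih (l.erase []) (by rw [List.count_erase_self]; omega), pv_erase_filter]

theorem pv_removeLoop (l : List (List Char)) :
    (List.range (l.count [])).foldl (fun acc _ => (PySem.List.remove? acc []).getD acc) l
      = l.filter (fun x => x ≠ []) := by
  rw [pv_foldRange_iterate]
  exact pv_iterRem (l.count []) l rfl

theorem pv_foldB_tok (tok : List Char) : ∀ (out : List (List Char)) (t0 : List Char),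
    ' ' ∉ tok → tok.foldl pvStepB (out, t0) = (out, t0 ++ tok) := by
  induction tok with
  | nil => intro out t0 _; simp
  | cons c t ih =>
    intro out t0 h
    have hc : ¬ c = ' ' := by intro e; exact h (e ▸ List.mem_cons_self)
    rw [List.foldl_cons]
    have hstep : pvStepB (out, t0) c = (out, t0 ++ [c]) := by
      simp [pvStepB, hc]
    rw [hstep, ih out (t0 ++ [c]) (fun m => h (List.mem_cons_of_mem _ m))]
    simp

theorem pv_dropWhile_head (l : List Char) (d : Char) (ds : List Char)
    (h : l.dropWhile (fun c => c != ' ') = d :: ds) : d = ' ' := by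
  induction l with
  | nil => simp at h
  | cons x xs ih =>
    rw [List.dropWhile_cons] at h
    by_cases hx : (x != ' ') = true
    · rw [if_pos hx] at h; exact ih h
    · rw [if_neg hx] at h
      have : x = ' ' := by simpa using hx
      cases h
      exact this

theorem pv_main (n : Nat) : ∀ (cs : List Char), cs.length ≤ n →
    ∀ (wl : List (List Char)) (out : List (List Char)), out = wl.filter (fun x => x ≠ []) →
    ((pvScan (some ' ') wl [] cs).1 ++ [(pvScan (some ' ') wl [] cs).2]).filter (fun x => x ≠ [])
      = (cs.foldl pvStepB (out, [])).1
          ++ (if pvCleanTok (cs.foldl pvStepB (out, [])).2 ≠ []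
              then [pvCleanTok (cs.foldl pvStepB (out, [])).2] else []) := by
  induction n with
  | zero =>
    intro cs h wl out hout
    have : cs = [] := List.eq_nil_of_length_eq_zero (Nat.le_zero.mp h)
    subst this
    simp only [List.foldl_nil, pvScan]
    rw [show pvCleanTok [] = [] from rfl]
    simp [List.filter_append, hout]
  | succ n ih =>
    intro cs hlen wl out hout
    cases hdw : cs.dropWhile (fun c => c != ' ') with
    | nil =>
      have hcs : cs = cs.takeWhile (fun c => c != ' ') := by
        conv_lhs => rw [← List.takeWhile_append_dropWhile (p := fun c => c != ' ') (l := cs)]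
        rw [hdw, List.append_nil]
      have htok : ' ' ∉ cs.takeWhile (fun c => c != ' ') := by
        intro hm
        have := List.mem_takeWhile_imp hm
        simp at this
      rw [hcs]
      rw [pv_tok_nospace _ ' ' wl [] htok]
      rw [pv_foldB_tok _ out [] htok]
      rw [pv_cleanTok_eq]
      simp only [pv_isalpha_space, List.nil_append]
      simp [List.filter_append, hout, List.filter_cons]
    | cons d ds =>
      have hd : d = ' ' := pv_dropWhile_head cs d ds hdw
      subst hd
      have hcs : cs = cs.takeWhile (fun c => c != ' ') ++ ' ' :: ds := by
        conv_lhs => rw [← List.takeWhile_append_dropWhile (p := fun c => c != ' ') (l := cs)]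
        rw [hdw]
      have htok : ' ' ∉ cs.takeWhile (fun c => c != ' ') := by
        intro hm
        have := List.mem_takeWhile_imp hm
        simp at this
      have hlen2 : ds.length ≤ n := by
        have := congrArg List.length hcs
        simp [List.length_append] at this
        omega
      rw [hcs]
      rw [pv_tok_space _ ' ' wl [] ds htok]
      rw [List.foldl_append, pv_foldB_tok _ out [] htok, List.foldl_cons]
      have hstep : pvStepB (out, [] ++ cs.takeWhile (fun c => c != ' ')) ' '
          = (out ++ (if pvCleanTok (cs.takeWhile (fun c => c != ' ')) ≠ []
                then [pvCleanTok (cs.takeWhile (fun c => c != ' '))] else []), []) := by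
        simp [pvStepB]
      rw [hstep]
      simp only [pv_isalpha_space, List.nil_append]
      exact ih ds hlen2 (wl ++ [pvClean false (cs.takeWhile (fun c => c != ' '))]) _
        (by simp [List.filter_append, hout, List.filter_cons, pv_cleanTok_eq])

theorem pv_top (cs : List Char) :
    (List.range
        ((((PySem.List.enumerate cs 0).foldl (pvStepA cs) ([], [])).1
            ++ [((PySem.List.enumerate cs 0).foldl (pvStepA cs) ([], [])).2]).count [])).foldl
      (fun acc _ => (PySem.List.remove? acc []).getD acc)
      (((PySem.List.enumerate cs 0).foldl (pvStepA cs) ([], [])).1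
        ++ [((PySem.List.enumerate cs 0).foldl (pvStepA cs) ([], [])).2])
    = (cs.foldl pvStepB ([], [])).1
        ++ (if pvCleanTok ((cs.foldl pvStepB ([], [])).2) ≠ []
            then [pvCleanTok ((cs.foldl pvStepB ([], [])).2)] else []) := by
  have hA : (PySem.List.enumerate cs 0).foldl (pvStepA cs) ([], [])
      = pvScan (some ' ') [] [] cs := by
    have h := pv_enumFoldA cs [] [] []
    simp only [List.length_nil, Nat.cast_zero, List.nil_append, List.getLast?_nil] at h
    rw [h, pv_scan_none]
  rw [hA, pv_removeLoop]
  exact pv_main cs.length cs le_rfl [] [] rfl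

-- ===== VERDICT (by name: the statement is the Claim_ definition above) =====
theorem word_findr_spec : Claim_equal_word_findr := by
  intro input _
  show word_findr input = word_findr_alt input
  unfold word_findr word_findr_alt
  exact congrArg (List.map (fun w => String.ofList w)) (pv_top input.toList)
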